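-- pv_equiv track=rewrite | github.com/flyingflying/learning-notes-2024 | 10_numpy/strides_algorithm/iter.py | gen_forder_index
-- ===== SOURCE A (Python) =====
-- def gen_forder_index(shape: tuple[int, ...]):
--
--     # F order 需要反向建树, 并将 path 反过来输出
--     ndim = len(shape)
--     path = []
--
--     def _recursion(depth):
--
--         if len(path) == ndim:
--             yield tuple(reversed(path))
--             return
--
--         for i in range(shape[depth]):
--             path.append(i)
--             yield from _recursion(depth - 1)
--             path.pop(-1)
--
--     yield from _recursion(ndim - 1)
-- ===== SOURCE B (Python) =====
-- def gen_forder_index(shape: tuple[int, ...]):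
--     # Arithmetic decoding: each linear index n in range(prod(shape)) is decoded
--     # by repeated divmod over the axes in forward order (first axis fastest),
--     # which is exactly Fortran order. No recursion, no path stack.
--     if any(s <= 0 for s in shape):
--         return
--     total = 1
--     for s in shape:
--         total *= s
--     for n in range(total):
--         idx = []
--         for s in shape:
--             idx.append(n % s)
--             n //= s
--         yield tuple(idx)
-- ===== Notes on version B (the rewrite author's own statement) =====
-- stated objective: alternative
-- what changed: Replaces the reversed recursive tree walk with a mutable path stack by a single flat loop over linear indices 0..prod(shape)-1, decoding each into a multi-index by repeated divmod over the axes in forward order (first axis fastest).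
import Mathlib
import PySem

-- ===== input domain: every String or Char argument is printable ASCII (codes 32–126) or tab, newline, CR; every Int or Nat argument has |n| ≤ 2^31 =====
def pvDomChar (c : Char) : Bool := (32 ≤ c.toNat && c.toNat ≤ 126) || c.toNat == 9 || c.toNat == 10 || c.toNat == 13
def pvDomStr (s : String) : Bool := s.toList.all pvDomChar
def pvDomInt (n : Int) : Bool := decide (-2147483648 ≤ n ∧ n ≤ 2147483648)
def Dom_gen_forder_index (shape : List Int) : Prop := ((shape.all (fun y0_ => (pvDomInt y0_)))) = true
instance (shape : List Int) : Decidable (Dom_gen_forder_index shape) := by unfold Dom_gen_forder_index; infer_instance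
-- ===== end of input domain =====

-- B replaces A's reversed recursive tree walk by one flat loop over linear indices,
-- decoded by repeated divmod over the axes in forward order (alternative algorithm, same cost).


-- ===== PORT A =====
-- _recursion(depth): the fuel argument only guards totality (each call either finishes the
-- path or lengthens it by one, so the depth of recursion is at most ndim+1); shape[depth] is
-- always accessed in range (depth = ndim-1-len(path)), so pyGetD's default is never read.
def pvRecA (shape : List Int) (ndim : Nat) : Nat → List Int → Int → List (List Int)
  | 0, _, _ => []
  | fuel+1, path, depth =>
    if path.length = ndim then [path.reverse]
    else
      (PySem.List.pyRange 0 (PySem.List.pyGetD shape depth 0) 1).flatMap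
        (fun i => pvRecA shape ndim fuel (path ++ [i]) (depth - 1))

def gen_forder_index (shape : List Int) : List (List Int) :=
  pvRecA shape shape.length (shape.length + 1) [] ((shape.length : Int) - 1)

-- ===== PORT B =====
-- the inner 'for s in shape: idx.append(n % s); n //= s' loop
def pvDecode : List Int → Int → List Int
  | [], _ => []
  | s :: rest, n => PySem.Int.mod n s :: pvDecode rest (PySem.Int.floordiv n s)

def gen_forder_index_alt (shape : List Int) : List (List Int) :=
  if shape.any (fun s => s ≤ 0) then []
  else (PySem.List.pyRange 0 (shape.foldl (· * ·) 1) 1).map (pvDecode shape)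

-- ===== PRECONDITION & SPEC =====
def Spec_gen_forder_index (shape : List Int) (out : List (List Int)) : Prop := out = gen_forder_index_alt shape
instance (shape : List Int) (out : List (List Int)) : Decidable (Spec_gen_forder_index shape out) := by unfold Spec_gen_forder_index; infer_instance

-- ===== CLAIM (what is proved, stated in full; the proofs are below) =====
def Claim_equal_gen_forder_index : Prop := ∀ (shape : List Int), Dom_gen_forder_index shape → Spec_gen_forder_index shape (gen_forder_index shape)

-- ===== LEMMAS AND PROOFS =====

-- Reference enumeration: all multi-indices of `shape` in Fortran order (first axis fastest).
def pvGenF : List Int → List (List Int)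
  | [] => [[]]
  | s :: rest => (pvGenF rest).flatMap (fun t => (PySem.List.pyRange 0 s 1).map (fun i => i :: t))

theorem pvRange_nonpos {s : Int} (h : s ≤ 0) : PySem.List.pyRange 0 s 1 = [] := by
  rw [PySem.List.pyRange_one]; simp; omega

theorem pvGenF_snoc (pre : List Int) (s : Int) :
    pvGenF (pre ++ [s]) =
      (PySem.List.pyRange 0 s 1).flatMap (fun i => (pvGenF pre).map (· ++ [i])) := by
  induction pre with
  | nil => simp [pvGenF, ← List.map_eq_flatMap]
  | cons p pre ih =>
      simp only [List.cons_append, pvGenF, ih, List.flatMap_assoc, List.map_flatMap,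
        List.flatMap_map]
      simp [Function.comp_def]

theorem pvGenF_of_nonpos (shape : List Int) (h : ∃ s ∈ shape, s ≤ 0) : pvGenF shape = [] := by
  induction shape with
  | nil => simp at h
  | cons p rest ih =>
      rcases h with ⟨s, hs, hle⟩
      rcases List.mem_cons.mp hs with rfl | hmem
      · simp [pvGenF, pvRange_nonpos hle]
      · simp [pvGenF, ih ⟨s, hmem, hle⟩]

theorem pvRecA_eq (shape : List Int) :
    ∀ (d : Nat) (fuel : Nat) (path : List Int), path.length + d = shape.length → d < fuel →
      pvRecA shape shape.length fuel path ((d : Int) - 1) =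
        (pvGenF (shape.take d)).map (· ++ path.reverse) := by
  intro d
  induction d with
  | zero =>
      intro fuel path hlen hf
      obtain ⟨f, rfl⟩ : ∃ f, fuel = f + 1 := ⟨fuel - 1, by omega⟩
      simp [pvRecA, pvGenF, (show path.length = shape.length by omega)]
  | succ d ih =>
      intro fuel path hlen hf
      obtain ⟨f, rfl⟩ : ∃ f, fuel = f + 1 := ⟨fuel - 1, by omega⟩
      have hd : d < shape.length := by omega
      have hcast : ((d + 1 : Nat) : Int) - 1 = (d : Int) := by push_cast; ring
      have hget : PySem.List.pyGetD shape ((d : Int)) 0 = shape[d] := by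
        rw [PySem.List.pyGetD_natCast]; exact List.getD_eq_getElem shape 0 hd
      have hne : ¬ path.length = shape.length := by omega
      rw [show pvRecA shape shape.length (f+1) path (((d+1 : Nat) : Int) - 1)
            = (PySem.List.pyRange 0 (PySem.List.pyGetD shape (((d+1:Nat):Int) - 1) 0) 1).flatMap
                (fun i => pvRecA shape shape.length f (path ++ [i]) ((((d+1:Nat):Int) - 1) - 1))
          from by simp [pvRecA, hne]]
      rw [hcast, hget]
      have hrec : ∀ i : Int,
          pvRecA shape shape.length f (path ++ [i]) ((d : Int) - 1)
            = (pvGenF (shape.take d)).map (· ++ (path ++ [i]).reverse) := by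
        intro i
        exact ih f (path ++ [i]) (by simp; omega) (by omega)
      calc (PySem.List.pyRange 0 shape[d] 1).flatMap
              (fun i => pvRecA shape shape.length f (path ++ [i]) ((d : Int) - 1))
          = (PySem.List.pyRange 0 shape[d] 1).flatMap
              (fun i => (pvGenF (shape.take d)).map (· ++ (i :: path.reverse))) := by
            simp only [hrec, List.reverse_append, List.reverse_singleton, List.singleton_append]
        _ = (pvGenF (shape.take (d+1))).map (· ++ path.reverse) := by
            rw [List.take_add_one, List.getElem?_eq_getElem hd]
            simp only [Option.toList_some]
            rw [pvGenF_snoc]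
            simp [List.map_flatMap, List.map_map, Function.comp_def]

theorem genA_eq (shape : List Int) : gen_forder_index shape = pvGenF shape := by
  have := pvRecA_eq shape shape.length (shape.length + 1) [] (by simp) (by omega)
  simpa [gen_forder_index] using this

theorem pvFoldlMul (l : List Int) : ∀ a : Int, l.foldl (· * ·) a = a * l.foldl (· * ·) 1 := by
  induction l with
  | nil => intro a; simp
  | cons x l ih => intro a; simp only [List.foldl_cons]; rw [ih (a*x), ih (1*x)]; ring

theorem pvProd_pos (l : List Int) (h : ∀ s ∈ l, 0 < s) : 0 < l.foldl (· * ·) 1 := by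
  induction l with
  | nil => simp
  | cons x l ih =>
      simp only [List.foldl_cons, one_mul]
      rw [pvFoldlMul]
      exact mul_pos (h x (by simp)) (ih (fun s hs => h s (by simp [hs])))

theorem pvDecode_mul (rest : List Int) (sn : Nat) (hs : 0 < sn) :
    ∀ tn : Nat, (List.range (sn * tn)).map (fun k : Nat => pvDecode ((sn : Int) :: rest) (k : Int))
      = (List.range tn).flatMap
          (fun m : Nat => (List.range sn).map (fun i : Nat => ((i : Int)) :: pvDecode rest ((m : Int)))) := by
  intro tn
  induction tn with
  | zero => simp
  | succ t iht =>
      rw [Nat.mul_succ, List.range_add, List.range_succ]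
      simp only [List.map_append, List.flatMap_append, iht, List.flatMap_cons, List.flatMap_nil,
        List.append_nil, List.map_map, Function.comp_def]
      congr 1
      apply List.map_congr_left
      intro i hi
      have hi' : i < sn := List.mem_range.mp hi
      simp only [pvDecode]
      rw [PySem.Int.mod_natCast, PySem.Int.floordiv_natCast]
      have h1 : (sn * t + i) % sn = i := by rw [Nat.mul_add_mod]; exact Nat.mod_eq_of_lt hi'
      have h2 : (sn * t + i) / sn = t := by rw [Nat.mul_add_div hs, Nat.div_eq_of_lt hi', Nat.add_zero]
      rw [h1, h2]

theorem pvDecode_range (shape : List Int) (h : ∀ s ∈ shape, 0 < s) :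
    (PySem.List.pyRange 0 (shape.foldl (· * ·) 1) 1).map (pvDecode shape) = pvGenF shape := by
  induction shape with
  | nil =>
      simp [pvGenF, pvDecode, PySem.List.pyRange_one]
  | cons s rest ih =>
      have hs : 0 < s := h s (by simp)
      have hrest : ∀ x ∈ rest, 0 < x := fun x hx => h x (by simp [hx])
      have hT : 0 < rest.foldl (· * ·) 1 := pvProd_pos rest hrest
      -- move to Nat
      obtain ⟨sn, rfl⟩ : ∃ sn : Nat, s = (sn : Int) := ⟨s.toNat, by omega⟩
      obtain ⟨tn, hTn⟩ : ∃ tn : Nat, rest.foldl (· * ·) 1 = (tn : Int) :=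
        ⟨(rest.foldl (· * ·) 1).toNat, by omega⟩
      have hfold : (rest.foldl (· * ·) ((sn:Int)) : Int) = ((sn * tn : Nat) : Int) := by
        rw [pvFoldlMul, hTn]; push_cast; ring
      simp only [List.foldl_cons, one_mul, hfold]
      simp only [pvGenF]
      rw [← ih hrest, hTn]
      rw [PySem.List.pyRange_zero_nat, PySem.List.pyRange_zero_nat]
      have hsn : 0 < sn := by exact_mod_cast hs
      simp only [List.map_map, List.flatMap_map, Function.comp_def]
      rw [PySem.List.pyRange_zero_nat]
      simp only [List.flatMap_map]
      exact pvDecode_mul rest sn hsn tn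

theorem genB_eq (shape : List Int) : gen_forder_index_alt shape = pvGenF shape := by
  by_cases hneg : ∃ s ∈ shape, s ≤ 0
  · have : shape.any (fun s => s ≤ 0) = true := by
      rcases hneg with ⟨s, hs, hle⟩
      exact List.any_eq_true.mpr ⟨s, hs, by simpa using hle⟩
    rw [gen_forder_index_alt, if_pos this, pvGenF_of_nonpos shape hneg]
  · have hpos : ∀ s ∈ shape, 0 < s := by
      intro s hs
      by_contra hc
      exact hneg ⟨s, hs, by omega⟩
    have : shape.any (fun s => s ≤ 0) = false := by
      simp only [List.any_eq_false]
      intro s hs; simpa using hpos s hs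
    rw [gen_forder_index_alt, if_neg (by simp [this]), pvDecode_range shape hpos]

-- ===== VERDICT (by name: the statement is the Claim_ definition above) =====
theorem gen_forder_index_spec : Claim_equal_gen_forder_index := by
  intro shape _
  unfold Spec_gen_forder_index
  rw [genA_eq, genB_eq]
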